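-- pv_equiv track=rewrite | github.com/jgacituag/wrf_python_assimilation | io/cross_sections_time.py | _intersect_time_axes
-- ===== SOURCE A (Python) =====
-- def _intersect_time_axes(member_tables):
--     """Ensure all members share the same time axis; align paths accordingly."""
--     # Build sets of datetimes per member
--     dt_lists = [ [dt for _, dt in tbl] for tbl in member_tables ]
--     # Intersect (keep order of the first member)
--     base = dt_lists[0]
--     common = [dt for dt in base if all(dt in dts for dts in dt_lists[1:])]
--     if not common:
--         raise ValueError("No common times across members. Ensure consistent times.")
--     # For each member, map dt -> path
--     aligned = []
--     for tbl in member_tables: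
--         d2p = {dt: p for p, dt in tbl}
--         paths = [d2p[dt] for dt in common]
--         aligned.append(paths)
--     return common, aligned
-- ===== SOURCE B (Python) =====
-- def _intersect_time_axes(member_tables):
--     """Ensure all members share the same time axis; align paths accordingly."""
--     # One sweep: frequency table of datetimes (each member counted once via set-dedup)
--     cnt = {}
--     for tbl in member_tables:
--         for dt in {dt for _, dt in tbl}:
--             cnt[dt] = cnt.get(dt, 0) + 1
--     n = len(member_tables)
--     # A datetime is common iff it occurs in all n members; keep first member's order
--     common = [dt for _, dt in member_tables[0] if cnt.get(dt, 0) == n]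
--     if not common:
--         raise ValueError("No common times across members. Ensure consistent times.")
--     aligned = [[{dt: p for p, dt in tbl}[dt] for dt in common] for tbl in member_tables]
--     return common, aligned
-- ===== Notes on version B (the rewrite author's own statement) =====
-- stated objective: alternative
-- what changed: B sweeps all members once building a frequency table (dict counter over each member's deduplicated datetimes) and selects the first member's datetimes whose count equals the number of members, instead of A's per-element all()-scan over every other member's datetime list.
import Mathlib
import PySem

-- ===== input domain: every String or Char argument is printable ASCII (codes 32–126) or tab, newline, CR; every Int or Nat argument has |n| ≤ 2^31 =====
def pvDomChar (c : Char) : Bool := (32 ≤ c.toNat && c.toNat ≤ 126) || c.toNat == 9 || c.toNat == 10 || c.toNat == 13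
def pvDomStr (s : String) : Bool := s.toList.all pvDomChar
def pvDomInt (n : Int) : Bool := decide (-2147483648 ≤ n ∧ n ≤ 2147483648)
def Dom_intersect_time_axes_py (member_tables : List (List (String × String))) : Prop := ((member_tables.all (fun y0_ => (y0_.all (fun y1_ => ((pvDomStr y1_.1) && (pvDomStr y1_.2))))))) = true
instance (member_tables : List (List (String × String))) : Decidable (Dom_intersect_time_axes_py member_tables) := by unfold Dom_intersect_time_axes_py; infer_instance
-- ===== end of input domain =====

-- B builds a frequency table of datetimes in one sweep (each member dedup-counted once) and keeps
-- the first member's datetimes with count = number of members, instead of A's per-element all()-scan.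

-- ===== PORT A =====
def intersect_time_axes_py (member_tables : List (List (String × String))) : List String × List (List String) :=
  let dt_lists := member_tables.map (fun tbl => tbl.map (fun pr => pr.2))
  let base := dt_lists.headD []            -- dt_lists[0]; IndexError on [] excluded by Pre_
  let common := base.filter (fun dt => (dt_lists.drop 1).all (fun dts => dts.contains dt))
  -- 'if not common: raise ValueError' — excluded by Pre_
  let aligned := member_tables.foldl (fun acc tbl =>
      let d2p := tbl.foldl (fun d pr => d.insert pr.2 pr.1) PySem.Dict.empty
      let paths := common.map (fun dt => d2p.getD dt "")   -- KeyError impossible: dt is in every member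
      acc ++ [paths]) []
  (common, aligned)

-- ===== PORT B =====
def intersect_time_axes_py_alt (member_tables : List (List (String × String))) : List String × List (List String) :=
  -- counter loop: for each member, for dt in set of its datetimes, cnt[dt] = cnt.get(dt,0)+1
  -- (iterating the Set is sound: the counter dict is only looked up afterwards)
  let cnt := member_tables.foldl (fun d tbl =>
      (PySem.Set.ofList (tbl.map (fun pr => pr.2))).foldl
        (fun d dt => d.insert dt (d.getD dt 0 + 1)) d)
      PySem.Dict.empty
  let n : Int := member_tables.length
  let common := ((member_tables.headD []).map (fun pr => pr.2)).filter
      (fun dt => cnt.getD dt 0 == n)       -- member_tables[0]; IndexError on [] excluded by Pre_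
  -- 'if not common: raise ValueError' — excluded by Pre_
  let aligned := member_tables.map (fun tbl =>
      common.map (fun dt => (tbl.foldl (fun d pr => d.insert pr.2 pr.1) PySem.Dict.empty).getD dt ""))
  (common, aligned)

-- ===== PRECONDITION & SPEC =====
-- Pre_ excludes exactly the inputs where A raises: empty member_tables (IndexError) and
-- inputs with no datetime of the first member present in every member (ValueError).
def Pre_intersect_time_axes_py (member_tables : List (List (String × String))) : Prop :=
  member_tables ≠ [] ∧
  ∃ dt ∈ (member_tables.headD []).map (fun pr => pr.2),
    ∀ tbl ∈ member_tables, dt ∈ tbl.map (fun pr => pr.2)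
instance (member_tables : List (List (String × String))) : Decidable (Pre_intersect_time_axes_py member_tables) := by unfold Pre_intersect_time_axes_py; infer_instance
def pvWitness_intersect_time_axes_py : (List (List (String × String))) :=
  [[("a/t1", "t1"), ("a/t2", "t2")], [("b/t2", "t2")]]
def Spec_intersect_time_axes_py (member_tables : List (List (String × String))) (out : List String × List (List String)) : Prop := out = intersect_time_axes_py_alt member_tables
instance (member_tables : List (List (String × String))) (out : List String × List (List String)) : Decidable (Spec_intersect_time_axes_py member_tables out) := by unfold Spec_intersect_time_axes_py; infer_instance

-- ===== CLAIM (what is proved, stated in full; the proofs are below) =====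
def Claim_equal_intersect_time_axes_py : Prop := ∀ (member_tables : List (List (String × String))), Dom_intersect_time_axes_py member_tables → Pre_intersect_time_axes_py member_tables → Spec_intersect_time_axes_py member_tables (intersect_time_axes_py member_tables)

-- ===== LEMMAS AND PROOFS =====

-- the counter fold counts, for each dt, the number of members whose datetime list contains dt
lemma getD_counter_fold (mts : List (List (String × String))) (d : PySem.Dict String Int) (dt : String) :
    (mts.foldl (fun d tbl =>
        (PySem.Set.ofList (tbl.map (fun pr => pr.2))).foldl
          (fun d x => d.insert x (d.getD x 0 + 1)) d) d).getD dt 0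
      = d.getD dt 0 + ((mts.filter (fun tbl => (tbl.map (fun pr => pr.2)).contains dt)).length : Int) := by
  induction mts generalizing d with
  | nil => simp
  | cons t ts ih =>
    simp only [List.foldl_cons, ih, PySem.Dict.getD_foldl_insert_add_one, List.filter_cons]
    have hnd : (PySem.Set.ofList (t.map (fun pr => pr.2))).Nodup := PySem.Set.nodup_ofList _
    by_cases hm : dt ∈ t.map (fun pr => pr.2)
    · have hmem : dt ∈ PySem.Set.ofList (t.map (fun pr => pr.2)) := by
        simpa [PySem.Set.mem_ofList] using hm
      rw [List.count_eq_one_of_mem hnd hmem]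
      simp [hm]
      push_cast
      ring
    · have : dt ∉ PySem.Set.ofList (t.map (fun pr => pr.2)) := by
        simpa [PySem.Set.mem_ofList] using hm
      rw [List.count_eq_zero.mpr this]
      simp [List.contains_iff_mem, hm]

-- A's for-loop accumulator is a map
lemma foldl_append_singleton {α β : Type} (f : α → β) (l : List α) (acc : List β) :
    l.foldl (fun a x => a ++ [f x]) acc = acc ++ l.map f := by
  induction l generalizing acc with
  | nil => simp
  | cons x xs ih => simp [ih]

-- ===== VERDICT (by name: the statement is the Claim_ definition above) =====

theorem intersect_time_axes_py_spec : Claim_equal_intersect_time_axes_py := by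
  intro mt _ _
  unfold Spec_intersect_time_axes_py intersect_time_axes_py intersect_time_axes_py_alt
  cases mt with
  | nil => simp
  | cons t rest =>
    simp only [List.map_cons, List.headD_cons, List.drop_succ_cons, List.drop_zero]
    have hcommon :
        (t.map (fun pr => pr.2)).filter
            (fun dt => ((rest.map (fun tbl => tbl.map (fun pr => pr.2))).all (fun dts => dts.contains dt))) =
        (t.map (fun pr => pr.2)).filter
            (fun dt => ((t :: rest).foldl (fun d tbl =>
                (PySem.Set.ofList (tbl.map (fun pr => pr.2))).foldl
                  (fun d x => d.insert x (d.getD x 0 + 1)) d) PySem.Dict.empty).getD dt 0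
              == ((t :: rest).length : Int)) := by
      apply List.filter_congr
      intro dt hdt
      rw [Bool.eq_iff_iff, getD_counter_fold]
      simp only [PySem.Dict.getD_empty, zero_add, beq_iff_eq, Nat.cast_inj, List.all_eq_true,
        List.mem_map]
      constructor
      · intro h
        have hall : ∀ tbl ∈ (t :: rest), (tbl.map (fun pr => pr.2)).contains dt = true := by
          intro tbl htbl
          rcases htbl with _ | htbl
          · simpa [List.contains_iff_mem] using hdt
          · have := h (tbl.map (fun pr => pr.2)) ⟨tbl, by assumption, rfl⟩
            simpa using this
        exact List.length_filter_eq_length_iff.mpr hall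
      · intro h dts ⟨tbl, htbl, hdts⟩
        have := List.length_filter_eq_length_iff.mp h tbl (by simp [htbl])
        subst hdts; simpa using this
    simp only [hcommon, foldl_append_singleton, List.nil_append, List.map_cons]
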